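-- pv_equiv track=rewrite | github.com/nmn0gueira/split-mpc-pipeline | src/programs/common/utils.py | parse_column_spec
-- ===== SOURCE A (Python) =====
-- def parse_column_spec(column_spec):
--     alice_cols = bob_cols = 0
--     for ch in column_spec:
--         if ch == 'a':
--             alice_cols += 1
--         elif ch == 'b':
--             bob_cols += 1
--         else:
--             raise ValueError(f"Unexpected column format: {column_spec}")
--     return alice_cols, bob_cols
-- ===== SOURCE B (Python) =====
-- def parse_column_spec(column_spec):
--     if set(column_spec) - {'a', 'b'}:
--         raise ValueError(f"Unexpected column format: {column_spec}")
--     return column_spec.count('a'), column_spec.count('b')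
-- ===== Notes on version B (the rewrite author's own statement) =====
-- stated objective: idiomatic
-- what changed: Replaces the single interleaved validate-and-count loop with a count-then-validate decomposition: a post-hoc set-difference check against {'a','b'} for validation, then two str.count calls for the counts.
import Mathlib
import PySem

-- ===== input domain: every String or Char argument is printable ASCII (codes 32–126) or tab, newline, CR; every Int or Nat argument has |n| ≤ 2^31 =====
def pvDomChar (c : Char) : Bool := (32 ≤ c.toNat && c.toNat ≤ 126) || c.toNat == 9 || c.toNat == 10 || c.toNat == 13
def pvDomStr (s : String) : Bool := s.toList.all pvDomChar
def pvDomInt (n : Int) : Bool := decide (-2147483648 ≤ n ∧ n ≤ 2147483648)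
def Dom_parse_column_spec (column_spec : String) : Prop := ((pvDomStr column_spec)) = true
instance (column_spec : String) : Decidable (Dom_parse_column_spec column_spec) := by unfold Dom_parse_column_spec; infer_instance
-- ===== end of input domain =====

-- B replaces A's interleaved validate-and-count loop by a count-then-validate decomposition
-- (set-difference validation, then str.count); objective: idiomatic. Equal on Pre_ (A raises elsewhere, and so does B).


-- ===== PORT A =====
-- the for-loop over the characters, carrying (alice_cols, bob_cols);
-- on the 'raise ValueError' branch the result is unspecified (Pre_ excludes it): return the current pair
def parseGoA : List Char → Int → Int → Int × Int
  | [], a, b => (a, b)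
  | c :: rest, a, b =>
    if c = 'a' then parseGoA rest (a + 1) b
    else if c = 'b' then parseGoA rest a (b + 1)
    else (a, b)

def parse_column_spec (column_spec : String) : Int × Int :=
  parseGoA column_spec.toList 0 0

-- ===== PORT B =====
-- 'if set(column_spec) - {'a','b'}: raise' then 'return column_spec.count('a'), column_spec.count('b')';
-- the raise branch's value is unspecified (Pre_ excludes it)
def parse_column_spec_alt (column_spec : String) : Int × Int :=
  if PySem.Set.diff (PySem.Set.ofList column_spec.toList) ['a', 'b'] ≠ [] then (0, 0)
  else ((PySem.Str.count column_spec "a" : Int), (PySem.Str.count column_spec "b" : Int))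

-- ===== PRECONDITION & SPEC =====
-- exactly the inputs on which A returns: every character is 'a' or 'b' (otherwise A raises ValueError, and so does B)
def Pre_parse_column_spec (column_spec : String) : Prop :=
  column_spec.toList.all (fun c => c == 'a' || c == 'b') = true
instance (column_spec : String) : Decidable (Pre_parse_column_spec column_spec) := by unfold Pre_parse_column_spec; infer_instance
def pvWitness_parse_column_spec : String := "abba"

def Spec_parse_column_spec (column_spec : String) (out : Int × Int) : Prop := out = parse_column_spec_alt column_spec
instance (column_spec : String) (out : Int × Int) : Decidable (Spec_parse_column_spec column_spec out) := by unfold Spec_parse_column_spec; infer_instance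

-- ===== CLAIM (what is proved, stated in full; the proofs are below) =====
def Claim_equal_parse_column_spec : Prop := ∀ (column_spec : String), Dom_parse_column_spec column_spec → Pre_parse_column_spec column_spec → Spec_parse_column_spec column_spec (parse_column_spec column_spec)

-- ===== LEMMAS AND PROOFS =====

-- A's loop is acc + (count 'a', count 'b') when every character is 'a' or 'b'
theorem parseGoA_eq (l : List Char) (a b : Int) (h : ∀ c ∈ l, c = 'a' ∨ c = 'b') :
    parseGoA l a b = (a + l.count 'a', b + l.count 'b') := by
  induction l generalizing a b with
  | nil => simp [parseGoA]
  | cons c rest ih =>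
    rcases h c (by simp) with hc | hc <;> subst hc <;>
      simp [parseGoA, ih _ _ (fun x hx => h x (by simp [hx]))] <;> ring_nf

-- the substring counter for a one-character pattern is the character count
theorem countGo_singleton (c : Char) (l : List Char) (fuel : Nat) (acc : Nat)
    (h : l.length ≤ fuel) :
    PySem.Chars.count.go [c] fuel l acc = acc + l.count c := by
  induction l generalizing fuel acc with
  | nil => cases fuel <;> simp [PySem.Chars.count.go]
  | cons x t ih =>
    cases fuel with
    | zero => simp at h
    | succ n =>
      simp only [PySem.Chars.count.go]
      by_cases hx : x = c
      · subst hx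
        have hpp : List.isPrefixOf [x] (x :: t) = true := by simp [List.isPrefixOf]
        simp only [hpp, if_true]
        have hd : List.drop [x].length (x :: t) = t := by simp
        rw [hd, ih n (acc + 1) (by simpa using h)]
        simp
        omega
      · have hpp : List.isPrefixOf [c] (x :: t) = false := by
          simp [List.isPrefixOf]; exact fun hh => (hx hh.symm).elim
        simp only [hpp, if_false, Bool.false_eq_true]
        rw [ih n acc (by simpa using Nat.le_of_succ_le_succ h)]
        simp [hx]

theorem str_count_single (s : String) (c : Char) :
    PySem.Str.count s (String.ofList [c]) = s.toList.count c := by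
  rw [PySem.Str.count_eq]
  have hl : (String.ofList [c]).toList = [c] := by simp
  rw [hl, PySem.Chars.count]
  simp only [List.isEmpty_cons, if_false, Bool.false_eq_true]
  rw [countGo_singleton c s.toList s.toList.length 0 le_rfl]; omega

-- ===== VERDICT (by name: the statement is the Claim_ definition above) =====
theorem parse_column_spec_spec : Claim_equal_parse_column_spec := by
  intro s _ hpre0
  unfold Pre_parse_column_spec at hpre0
  have hpre : ∀ c ∈ s.toList, c = 'a' ∨ c = 'b' := by
    intro c hc
    have := List.all_eq_true.mp hpre0 c hc
    simpa using this
  unfold Spec_parse_column_spec parse_column_spec parse_column_spec_alt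
  have hdiff : PySem.Set.diff (PySem.Set.ofList s.toList) ['a', 'b'] = [] := by
    rw [List.eq_nil_iff_forall_not_mem]
    intro c hc
    have hmem : c ∈ PySem.Set.ofList s.toList ∧ c ∉ (['a','b'] : List Char) := by
      simpa [PySem.Set.diff] using hc
    have : c ∈ s.toList := by
      have := hmem.1
      simpa [PySem.Set.mem_ofList] using this
    rcases hpre c this with h | h <;> subst h <;> simp at hmem
  rw [if_neg (by simp [hdiff])]
  rw [parseGoA_eq s.toList 0 0 hpre]
  have ha : ("a" : String) = String.ofList ['a'] := rfl
  have hb : ("b" : String) = String.ofList ['b'] := rfl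
  rw [ha, hb, str_count_single, str_count_single]
  simp
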